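-- pv_equiv track=rewrite | github.com/Farrah-Unger/Algorithm_Practice | blockparty.py | highest_max_indices
-- ===== SOURCE A (Python) =====
-- def highest_max_indices(lst):
--     if len(lst) < 2:
--         return None
--
--
--     max_sum = float('-inf')
--     for i in range(len(lst)-1):
--         if lst[i] + lst[i + 1] > max_sum:
--             max_sum = lst[i] + lst[i + 1]
--             pair = (i, i+1)
--
--     return pair
-- ===== SOURCE B (Python) =====
-- def highest_max_indices(lst):
--     if len(lst) < 2:
--         return None
--     sums = [lst[i] + lst[i + 1] for i in range(len(lst) - 1)]
--     best = max(sums)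
--     i = sums.index(best)
--     return (i, i + 1)
-- ===== Notes on version B (the rewrite author's own statement) =====
-- stated objective: simpler
-- what changed: Replaces A's single-pass running-maximum loop with mutable state (max_sum, pair) by a build-then-scan decomposition: a comprehension of adjacent-pair sums, then max() and list.index() to select the first maximal pair.
import Mathlib
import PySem

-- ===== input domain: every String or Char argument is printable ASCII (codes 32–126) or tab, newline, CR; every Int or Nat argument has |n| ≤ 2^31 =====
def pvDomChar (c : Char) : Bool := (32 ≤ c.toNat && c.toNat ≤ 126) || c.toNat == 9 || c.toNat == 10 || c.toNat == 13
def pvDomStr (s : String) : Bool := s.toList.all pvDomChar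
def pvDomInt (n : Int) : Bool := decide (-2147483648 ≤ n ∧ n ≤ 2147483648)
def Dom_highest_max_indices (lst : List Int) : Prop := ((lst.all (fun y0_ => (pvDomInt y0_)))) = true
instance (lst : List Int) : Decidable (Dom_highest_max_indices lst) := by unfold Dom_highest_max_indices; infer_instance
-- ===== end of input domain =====

-- B replaces A's single running-maximum loop by build-then-scan (sums list, max, first index); objective: simpler decomposition, same O(n) cost.

-- ===== PORT A =====
-- A's loop state: max_sum starts as float('-inf'), modelled as Option Int (none = -inf);
-- pair is unset before the first iteration, modelled as Option. Loop indices are always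
-- in range, so pyGetD's default 0 is never used.
def highest_max_indices (lst : List Int) : Option (Int × Int) :=
  if lst.length < 2 then none
  else
    ((PySem.List.pyRange 0 ((lst.length : Int) - 1) 1).foldl
      (fun (st : Option Int × Option (Int × Int)) i =>
        let s := PySem.List.pyGetD lst i 0 + PySem.List.pyGetD lst (i + 1) 0
        match st.1 with
        | none => (some s, some (i, i + 1))
        | some m => if s > m then (some s, some (i, i + 1)) else st)
      (none, none)).2

-- ===== PORT B =====
-- run of Source B: guard, comprehension of adjacent sums, max, first index.
-- The guard guarantees sums ≠ [], so the max?/index? none branches are unreachable totalization.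
def highest_max_indices_alt (lst : List Int) : Option (Int × Int) :=
  if lst.length < 2 then none
  else
    let sums := (PySem.List.pyRange 0 ((lst.length : Int) - 1) 1).map
      (fun i => PySem.List.pyGetD lst i 0 + PySem.List.pyGetD lst (i + 1) 0)
    match PySem.List.max? sums (fun y => y) with
    | none => none
    | some best =>
      match PySem.List.index? sums best with
      | none => none
      | some i => some ((i : Int), (i : Int) + 1)

-- ===== PRECONDITION & SPEC =====
def Spec_highest_max_indices (lst : List Int) (out : Option (Int × Int)) : Prop := out = highest_max_indices_alt lst
instance (lst : List Int) (out : Option (Int × Int)) : Decidable (Spec_highest_max_indices lst out) := by unfold Spec_highest_max_indices; infer_instance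

-- ===== CLAIM (what is proved, stated in full; the proofs are below) =====
def Claim_equal_highest_max_indices : Prop := ∀ (lst : List Int), Dom_highest_max_indices lst → Spec_highest_max_indices lst (highest_max_indices lst)

-- ===== LEMMAS AND PROOFS =====

-- value of max? on a snoc, from the max? of the prefix
theorem pv_max?_append_singleton (l : List Int) (M v : Int)
    (h : PySem.List.max? l (fun y => y) = some M) :
    PySem.List.max? (l ++ [v]) (fun y => y) = some (max M v) := by
  cases l with
  | nil => simp [PySem.List.max?] at h
  | cons x t =>
    rw [List.cons_append, PySem.List.max?_id_cons]
    rw [PySem.List.max?_id_cons] at h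
    simp only [Option.some.injEq] at h ⊢
    rw [List.foldl_append]
    simp [h]

-- characterisation of A's loop state after processing range(0, k):
-- max_sum holds the maximum of the adjacent sums seen, pair the first index attaining it.
theorem pv_loop_char (g : Int → Int) (k : Nat) (hk : 1 ≤ k) :
    ∃ (M : Int) (j : Nat),
      (PySem.List.pyRange 0 (k : Int) 1).foldl
        (fun (st : Option Int × Option (Int × Int)) i =>
          let s := g i
          match st.1 with
          | none => (some s, some (i, i + 1))
          | some m => if s > m then (some s, some (i, i + 1)) else st)
        (none, none) = (some M, some ((j : Int), (j : Int) + 1)) ∧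
      PySem.List.max? ((PySem.List.pyRange 0 (k : Int) 1).map g) (fun y => y) = some M ∧
      PySem.List.index? ((PySem.List.pyRange 0 (k : Int) 1).map g) M = some j := by
  induction k with
  | zero => omega
  | succ n ih =>
    by_cases hn : 1 ≤ n
    · obtain ⟨M, j, hfold, hmax, hidx⟩ := ih hn
      have hsplit : PySem.List.pyRange 0 ((n : Int) + 1) 1
          = PySem.List.pyRange 0 (n : Int) 1 ++ [(n : Int)] :=
        PySem.List.pyRange_one_succ_right (by positivity)
      have hcast : ((n + 1 : Nat) : Int) = (n : Int) + 1 := by push_cast; ring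
      rw [hcast, hsplit, List.foldl_append, List.map_append, hfold]
      set s := (PySem.List.pyRange 0 (n : Int) 1).map g with hs
      have hlen : s.length = n := by
        rw [hs, List.length_map, PySem.List.length_pyRange_one]; omega
      by_cases hgt : g (n : Int) > M
      · refine ⟨g (n : Int), n, ?_, ?_, ?_⟩
        · simp [hgt]
        · simp only [List.map_cons, List.map_nil]
          rw [pv_max?_append_singleton s M (g (n : Int)) hmax]
          simp [max_eq_right (le_of_lt hgt)]
        · have hnotmem : g (n : Int) ∉ s := by
            intro hmem
            have := PySem.List.max?_isMax hmax _ hmem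
            simp at this; omega
          simp only [List.map_cons, List.map_nil]
          rw [PySem.List.index?_append_singleton_self s _ hnotmem, hlen]
      · refine ⟨M, j, ?_, ?_, ?_⟩
        · simp [hgt]
        · simp only [List.map_cons, List.map_nil]
          rw [pv_max?_append_singleton s M (g (n : Int)) hmax]
          have : max M (g (n : Int)) = M := max_eq_left (by omega)
          rw [this]
        · have hmem : M ∈ s := PySem.List.max?_mem hmax
          simp only [List.map_cons, List.map_nil]
          rw [PySem.List.index?_append_of_mem _ hmem]
          exact hidx
    · -- n = 0, so k = 1: a single iteration
      have hn0 : n = 0 := by omega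
      subst hn0
      have h1 : ((1 : Nat) : Int) = (0 : Int) + 1 := by norm_num
      rw [h1, PySem.List.pyRange_one_singleton]
      refine ⟨g 0, 0, by simp, ?_, ?_⟩
      · simp [PySem.List.max?]
      · simp [PySem.List.index?]

theorem highest_max_indices_spec : Claim_equal_highest_max_indices := by
  intro lst _
  unfold Spec_highest_max_indices highest_max_indices highest_max_indices_alt
  by_cases hlen : lst.length < 2
  · simp [hlen]
  · simp only [hlen, if_false]
    have hk : 1 ≤ lst.length - 1 := by omega
    have hcast : (lst.length : Int) - 1 = ((lst.length - 1 : Nat) : Int) := by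
      push_cast [Nat.cast_sub (by omega : 1 ≤ lst.length)]; ring
    rw [hcast]
    obtain ⟨M, j, hfold, hmax, hidx⟩ := pv_loop_char
      (fun i => PySem.List.pyGetD lst i 0 + PySem.List.pyGetD lst (i + 1) 0)
      (lst.length - 1) hk
    rw [hfold, hmax]
    simp only [hidx]
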